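-- pv_equiv track=rewrite | github.com/Gimtex/pkj-compare | python/homework/homework1.py | dates_in_month
-- ===== SOURCE A (Python) =====
-- def dates_in_month(dates, month):
--     if not dates:
--         return []
--
--     h, *t = dates
--     if h[1] == month:
--         return [h] + dates_in_month(t, month)
--     else:
--         return dates_in_month(t, month)
-- ===== SOURCE B (Python) =====
-- def dates_in_month(dates, month):
--     result = []
--     for d in dates:
--         if d[1] == month:
--             result.append(d)
--     return result
-- ===== Notes on version B (the rewrite author's own statement) =====
-- stated objective: simpler
-- what changed: Replaced the head/tail recursion with repeated list concatenation by an iterative accumulator loop that appends matching dates in one pass.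
import Mathlib
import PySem

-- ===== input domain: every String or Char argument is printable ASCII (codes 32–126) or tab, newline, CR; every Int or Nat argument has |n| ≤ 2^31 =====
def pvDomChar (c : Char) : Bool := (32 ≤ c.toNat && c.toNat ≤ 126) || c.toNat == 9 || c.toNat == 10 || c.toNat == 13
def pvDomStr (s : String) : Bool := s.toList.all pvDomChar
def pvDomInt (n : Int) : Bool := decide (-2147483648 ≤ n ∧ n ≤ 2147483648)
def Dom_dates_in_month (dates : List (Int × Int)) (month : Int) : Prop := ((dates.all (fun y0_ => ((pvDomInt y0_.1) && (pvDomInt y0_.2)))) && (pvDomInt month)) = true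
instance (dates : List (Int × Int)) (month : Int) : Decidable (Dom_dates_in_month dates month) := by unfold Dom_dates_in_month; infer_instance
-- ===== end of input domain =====

-- B replaces A's head/tail recursion (with per-match list concatenation) by a single accumulator loop; objective: simpler.


-- ===== PORT A =====
def dates_in_month (dates : List (Int × Int)) (month : Int) : List (Int × Int) :=
  match dates with
  | [] => []
  | h :: t =>
    if h.2 == month then
      [h] ++ dates_in_month t month
    else
      dates_in_month t month

-- ===== PORT B =====
def dates_in_month_alt (dates : List (Int × Int)) (month : Int) : List (Int × Int) :=
  dates.foldl (fun result d => if d.2 == month then result ++ [d] else result) []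

-- ===== PRECONDITION & SPEC =====
def Spec_dates_in_month (dates : List (Int × Int)) (month : Int) (out : List (Int × Int)) : Prop := out = dates_in_month_alt dates month
instance (dates : List (Int × Int)) (month : Int) (out : List (Int × Int)) : Decidable (Spec_dates_in_month dates month out) := by unfold Spec_dates_in_month; infer_instance

-- ===== CLAIM (what is proved, stated in full; the proofs are below) =====
def Claim_equal_dates_in_month : Prop := ∀ (dates : List (Int × Int)) (month : Int), Dom_dates_in_month dates month → Spec_dates_in_month dates month (dates_in_month dates month)

-- ===== LEMMAS AND PROOFS =====
theorem dim_foldl_acc (dates : List (Int × Int)) (month : Int) (acc : List (Int × Int)) :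
    dates.foldl (fun result d => if d.2 == month then result ++ [d] else result) acc
      = acc ++ dates_in_month dates month := by
  induction dates generalizing acc with
  | nil => simp [dates_in_month]
  | cons h t ih =>
    simp only [List.foldl, dates_in_month]
    by_cases hm : h.2 == month
    · rw [if_pos hm, if_pos hm, ih]; simp
    · rw [if_neg hm, if_neg hm, ih]

-- ===== VERDICT (by name: the statement is the Claim_ definition above) =====
theorem dates_in_month_spec : Claim_equal_dates_in_month := by
  intro dates month _
  unfold Spec_dates_in_month dates_in_month_alt
  rw [dim_foldl_acc]
  simp
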